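-- pv_equiv track=rewrite | github.com/Ejanng/Truth-Table-Generator | newmain.py | fill_matrix_with_binary_count
-- ===== SOURCE A (Python) =====
-- def fill_matrix_with_binary_count(row, col):
--     # Initialize the matrix with zeros
--     matrix = [[0 for i in range(col)] for j in range(row)]
--
--     # Start filling the matrix with binary counting
--     for i in range(1, row):
--         # Copy the previous row
--         for j in range(col):
--             matrix[i][j] = matrix[i - 1][j]
--
--         # Increment binary by flipping bits from the end
--         for j in range(col - 1, -1, -1):
--             if matrix[i][j] == 0:
--                 matrix[i][j] = 1
--                 break
--             else:
--                 matrix[i][j] = 0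
--
--     return matrix
-- ===== SOURCE B (Python) =====
-- def fill_matrix_with_binary_count(row, col):
--     # Each row i is the col-bit binary representation of i (mod 2**col),
--     # extracted cell-by-cell: no incremental state between rows.
--     return [[(i >> (col - 1 - j)) & 1 for j in range(col)] for i in range(row)]
-- ===== Notes on version B (the rewrite author's own statement) =====
-- stated objective: simpler
-- what changed: Replaced the copy-previous-row plus ripple-carry in-place increment with a one-line closed form: cell (i,j) is bit (col-1-j) of i, so each row is computed independently of the others.
import Mathlib
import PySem

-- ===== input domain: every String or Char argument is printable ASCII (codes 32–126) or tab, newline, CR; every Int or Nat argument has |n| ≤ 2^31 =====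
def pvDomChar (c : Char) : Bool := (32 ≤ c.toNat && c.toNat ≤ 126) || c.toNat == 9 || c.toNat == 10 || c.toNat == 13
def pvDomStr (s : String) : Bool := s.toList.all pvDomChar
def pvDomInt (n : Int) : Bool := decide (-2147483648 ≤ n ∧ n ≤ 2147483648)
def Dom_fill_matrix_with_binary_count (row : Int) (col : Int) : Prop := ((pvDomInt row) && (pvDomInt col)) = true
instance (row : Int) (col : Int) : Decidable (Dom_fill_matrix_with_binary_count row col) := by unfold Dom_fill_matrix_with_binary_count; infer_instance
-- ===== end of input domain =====

-- B replaces A's copy-previous-row + ripple-carry in-place increment by a closed form: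
-- cell (i,j) is bit (col-1-j) of i; each row depends only on its own index (objective: simpler).


-- ===== PORT A =====
-- inner loop `for j in range(col-1,-1,-1): … break`: scans the row from its END,
-- flipping 1s to 0 until the first 0 becomes 1 — structural recursion on the reversed row
def pvIncRev : List Int → List Int
  | [] => []
  | x :: t => if x = 0 then 1 :: t else 0 :: pvIncRev t

def pvInc (r : List Int) : List Int := (pvIncRev r.reverse).reverse

def fill_matrix_with_binary_count (row : Int) (col : Int) : List (List Int) :=
  -- matrix = [[0 for i in range(col)] for j in range(row)]
  let matrix : List (List Int) :=
    (PySem.List.pyRange 0 row 1).map (fun _ => (PySem.List.pyRange 0 col 1).map (fun _ => (0 : Int)))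
  -- for i in range(1, row): copy row i-1 (the j-loop), then the descending increment loop
  (PySem.List.pyRange 1 row 1).foldl
    (fun m i =>
      let prev := m.getD (i.toNat - 1) []
      let copy := (PySem.List.pyRange 0 col 1).map (fun j => PySem.List.pyGetD prev j 0)
      m.set i.toNat (pvInc copy))
    matrix

-- ===== PORT B =====
-- [[(i >> (col - 1 - j)) & 1 for j in range(col)] for i in range(row)]
-- (shift amount col-1-j is ≥ 0 for every j produced by range(col), so .toNat is exact)
def fill_matrix_with_binary_count_alt (row : Int) (col : Int) : List (List Int) :=
  (PySem.List.pyRange 0 row 1).map (fun (i : Int) =>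
    (PySem.List.pyRange 0 col 1).map (fun (j : Int) =>
      PySem.Int.band (i >>> (col - 1 - j).toNat) 1))

-- ===== PRECONDITION & SPEC =====
def Spec_fill_matrix_with_binary_count (row : Int) (col : Int) (out : List (List Int)) : Prop := out = fill_matrix_with_binary_count_alt row col
instance (row : Int) (col : Int) (out : List (List Int)) : Decidable (Spec_fill_matrix_with_binary_count row col out) := by unfold Spec_fill_matrix_with_binary_count; infer_instance

-- ===== CLAIM (what is proved, stated in full; the proofs are below) =====
def Claim_equal_fill_matrix_with_binary_count : Prop := ∀ (row : Int) (col : Int), Dom_fill_matrix_with_binary_count row col → Spec_fill_matrix_with_binary_count row col (fill_matrix_with_binary_count row col)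

-- ===== LEMMAS AND PROOFS =====

-- binary digits of i, least significant first, padded/truncated to c digits
def pvBitsRev : Nat → Nat → List Int
  | 0, _ => []
  | c + 1, i => ((i % 2 : Nat) : Int) :: pvBitsRev c (i / 2)

-- row i of the matrix: the c-bit binary representation of i, most significant first
def pvRowOf (c i : Nat) : List Int := (pvBitsRev c i).reverse

theorem pvIncRev_bitsRev (c : Nat) : ∀ i : Nat, pvIncRev (pvBitsRev c i) = pvBitsRev c (i + 1) := by
  induction c with
  | zero => intro i; rfl
  | succ c ih =>
    intro i
    rcases Nat.even_or_odd i with h | h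
    · have h0 : i % 2 = 0 := Nat.even_iff.mp h
      have h1 : (i + 1) % 2 = 1 := by omega
      have h2 : (i + 1) / 2 = i / 2 := by omega
      simp [pvBitsRev, pvIncRev, h0, h1, h2]
    · have h0 : i % 2 = 1 := Nat.odd_iff.mp h
      have h1 : (i + 1) % 2 = 0 := by omega
      have h2 : (i + 1) / 2 = i / 2 + 1 := by omega
      simp [pvBitsRev, pvIncRev, h0, h1, h2, ih]

theorem pvInc_rowOf (c i : Nat) : pvInc (pvRowOf c i) = pvRowOf c (i + 1) := by
  simp [pvInc, pvRowOf, pvIncRev_bitsRev]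

theorem pvBitsRev_zero (c : Nat) : pvBitsRev c 0 = List.replicate c 0 := by
  induction c with
  | zero => rfl
  | succ c ih => simp [pvBitsRev, ih, List.replicate_succ]

theorem pvRowOf_zero (c : Nat) : pvRowOf c 0 = List.replicate c 0 := by
  simp [pvRowOf, pvBitsRev_zero]

theorem pvRowOf_length (c i : Nat) : (pvRowOf c i).length = c := by
  have : ∀ i, (pvBitsRev c i).length = c := by
    induction c with
    | zero => intro i; rfl
    | succ c ih => intro i; simp [pvBitsRev, ih]
  simp [pvRowOf, this]

-- closed form of pvRowOf: entry t is (i / 2^(c-1-t)) % 2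
theorem pvRowOf_eq_map (c : Nat) : ∀ i : Nat,
    pvRowOf c i = (List.range c).map (fun t => (((i / 2 ^ (c - 1 - t)) % 2 : Nat) : Int)) := by
  induction c with
  | zero => intro i; rfl
  | succ c ih =>
    intro i
    have hrev : pvRowOf (c + 1) i = pvRowOf c (i / 2) ++ [((i % 2 : Nat) : Int)] := by
      simp [pvRowOf, pvBitsRev]
    rw [hrev, ih (i / 2), List.range_succ, List.map_append]
    congr 1
    · apply List.map_congr_left
      intro t ht
      have ht' : t < c := List.mem_range.mp ht
      have : i / 2 / 2 ^ (c - 1 - t) = i / 2 ^ (c + 1 - 1 - t) := by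
        rw [Nat.div_div_eq_div_mul]
        congr 1
        rw [← pow_succ']
        congr 1
        omega
      rw [this]
    · simp

-- B's inner comprehension computes pvRowOf
theorem pvAlt_row_eq (c i : Nat) :
    (List.range c).map (fun (t : Nat) =>
        PySem.Int.band ((i : Int) >>> ((c : Int) - 1 - (t : Int)).toNat) 1)
      = pvRowOf c i := by
  rw [pvRowOf_eq_map]
  apply List.map_congr_left
  intro t ht
  have ht' : t < c := List.mem_range.mp ht
  have hsh : ((c : Int) - 1 - (t : Int)).toNat = c - 1 - t := by omega
  rw [hsh, Int.shiftRight_eq_div_pow, PySem.Int.band_one,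
      PySem.Int.mod_eq_emod_of_pos (by norm_num)]
  norm_cast

-- the loop-body step of port A
def pvStepA (col : Int) (m : List (List Int)) (i : Int) : List (List Int) :=
  let prev := m.getD (i.toNat - 1) []
  let copy := (PySem.List.pyRange 0 col 1).map (fun j => PySem.List.pyGetD prev j 0)
  m.set i.toNat (pvInc copy)

-- copying a row of length col.toNat cell by cell returns it unchanged
theorem pvCopy_rowOf (col : Int) (i : Nat) :
    (PySem.List.pyRange 0 col 1).map (fun j => PySem.List.pyGetD (pvRowOf col.toNat i) j 0)
      = pvRowOf col.toNat i := by
  by_cases hc : col ≤ 0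
  · have h0 : col.toNat = 0 := by omega
    have h1 : pvRowOf col.toNat i = [] := List.eq_nil_of_length_eq_zero (by rw [pvRowOf_length, h0])
    rw [PySem.List.pyRange_one_eq_nil hc, h1]
    rfl
  · have hlen : ((pvRowOf col.toNat i).length : Int) = col := by rw [pvRowOf_length]; omega
    calc (PySem.List.pyRange 0 col 1).map (fun j => PySem.List.pyGetD (pvRowOf col.toNat i) j 0)
        = (PySem.List.pyRange 0 ((pvRowOf col.toNat i).length : Int) 1).map
            (fun j => PySem.List.pyGetD (pvRowOf col.toNat i) j 0) := by rw [hlen]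
      _ = pvRowOf col.toNat i := PySem.List.map_pyGetD_pyRange_zero' _ _

-- loop invariant: after processing i = 1..k-1 the first k rows are binary counts, the rest zeros
theorem pvFoldA (r : Nat) (col : Int) :
    ∀ k : Nat, 1 ≤ k → k ≤ r →
    (PySem.List.pyRange (k : Int) (r : Int) 1).foldl (pvStepA col)
        ((List.range k).map (pvRowOf col.toNat) ++
          List.replicate (r - k) (List.replicate col.toNat 0))
      = (List.range r).map (pvRowOf col.toNat) := by
  intro k hk1 hkr
  induction hd : r - k generalizing k with
  | zero =>
    have hk : k = r := by omega
    subst hk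
    rw [PySem.List.pyRange_one_eq_nil (by omega)]
    simp
  | succ n ih =>
    have hkr' : k < r := by omega
    rw [PySem.List.pyRange_one_cons (by exact_mod_cast hkr')]
    have hstep : pvStepA col
        ((List.range k).map (pvRowOf col.toNat) ++
          List.replicate (n + 1) (List.replicate col.toNat 0)) (k : Int)
        = (List.range (k + 1)).map (pvRowOf col.toNat) ++
          List.replicate n (List.replicate col.toNat 0) := by
      have hlen : ((List.range k).map (pvRowOf col.toNat)).length = k := by simp
      have htn : ((k : Int)).toNat = k := by omega
      have hget : ((List.range k).map (pvRowOf col.toNat) ++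
            List.replicate (n + 1) (List.replicate col.toNat 0)).getD (k - 1) []
          = pvRowOf col.toNat (k - 1) := by
        have hlt : k - 1 < ((List.range k).map (pvRowOf col.toNat)).length := by
          rw [hlen]; omega
        rw [List.getD_eq_getElem _ _ (by simp; omega), List.getElem_append_left hlt]
        simp
      unfold pvStepA
      simp only [htn, hget]
      rw [pvCopy_rowOf col (k - 1), pvInc_rowOf]
      have hk1' : k - 1 + 1 = k := by omega
      rw [hk1', List.replicate_succ,
          List.set_append_right _ _ (by rw [hlen]),
          List.range_succ, List.map_append]
      simp [hlen]
    simp only [List.foldl_cons, hstep]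
    have hcast : ((k : Int)) + 1 = ((k + 1 : Nat) : Int) := by push_cast; ring
    rw [hcast]
    exact ih (k + 1) (by omega) (by omega) (by omega)

-- the initial zero matrix
theorem pvInit_eq (row col : Int) :
    (PySem.List.pyRange 0 row 1).map (fun _ => (PySem.List.pyRange 0 col 1).map (fun _ => (0 : Int)))
      = List.replicate row.toNat (List.replicate col.toNat 0) := by
  have hinner : (PySem.List.pyRange 0 col 1).map (fun _ => (0 : Int))
      = List.replicate col.toNat 0 := by
    rw [List.map_const']
    simp [PySem.List.length_pyRange_one]
  rw [hinner, List.map_const']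
  simp [PySem.List.length_pyRange_one]

-- ===== VERDICT (by name: the statement is the Claim_ definition above) =====
theorem fill_matrix_with_binary_count_spec : Claim_equal_fill_matrix_with_binary_count := by
  intro row col _
  unfold Spec_fill_matrix_with_binary_count fill_matrix_with_binary_count fill_matrix_with_binary_count_alt
  by_cases hr : row ≤ 0
  · rw [PySem.List.pyRange_one_eq_nil hr, PySem.List.pyRange_one_eq_nil (by omega : row ≤ 1)]
    simp
  · -- row ≥ 1
    have hr1 : (1 : Int) ≤ row := by omega
    set r := row.toNat with hrdef
    have hrow : row = (r : Int) := by omega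
    -- A's side: init + invariant
    rw [pvInit_eq]
    have hinit : List.replicate r (List.replicate col.toNat (0 : Int))
        = (List.range 1).map (pvRowOf col.toNat) ++
          List.replicate (r - 1) (List.replicate col.toNat 0) := by
      have : r = 1 + (r - 1) := by omega
      rw [List.range_one, List.map_singleton, pvRowOf_zero]
      rw [this, List.replicate_add, List.replicate_one]
      simp
    have hA : (PySem.List.pyRange 1 row 1).foldl (pvStepA col)
          (List.replicate r (List.replicate col.toNat 0))
        = (List.range r).map (pvRowOf col.toNat) := by
      rw [hinit, hrow]
      exact_mod_cast pvFoldA r col 1 le_rfl (by omega)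
    have hA' : (PySem.List.pyRange 1 row 1).foldl
          (fun m i =>
            m.set i.toNat (pvInc ((PySem.List.pyRange 0 col 1).map
              (fun j => PySem.List.pyGetD (m.getD (i.toNat - 1) []) j 0))))
          (List.replicate r (List.replicate col.toNat 0))
        = (List.range r).map (pvRowOf col.toNat) := hA
    rw [hA']
    -- B's side
    rw [hrow, PySem.List.pyRange_zero_natCast, List.map_map]
    apply List.map_congr_left
    intro k hk
    by_cases hc : col ≤ 0
    · have h0 : col.toNat = 0 := by omega
      have h1 : pvRowOf col.toNat k = [] :=
        List.eq_nil_of_length_eq_zero (by rw [pvRowOf_length, h0])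
      rw [h1]
      simp [Function.comp, PySem.List.pyRange_one_eq_nil hc]
    · have hcol : col = (col.toNat : Int) := by omega
      have := pvAlt_row_eq col.toNat k
      rw [← this]
      simp only [Function.comp]
      rw [hcol, PySem.List.pyRange_zero_natCast, List.map_map]
      rfl
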